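-- pv_equiv track=rewrite | github.com/gianmaurolarosa03/GiuBot | DiscordBot/thefinals_api.py | determine_sub_rank
-- ===== SOURCE A (Python) =====
-- def determine_sub_rank(rank_score: int, position: int = 99999) -> str:
--     if position <= 500:
--         return "Ruby"
--     subs = [
--         (47500, "Diamante 1"), (45000, "Diamante 2"), (42500, "Diamante 3"), (40000, "Diamante 4"),
--         (37500, "Platino 1"),  (35000, "Platino 2"),  (32500, "Platino 3"),  (30000, "Platino 4"),
--         (27500, "Oro 1"),      (25000, "Oro 2"),      (22500, "Oro 3"),      (20000, "Oro 4"),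
--         (17500, "Argento 1"),  (15000, "Argento 2"),  (12500, "Argento 3"),  (10000, "Argento 4"),
--         (7500, "Bronzo 1"),    (5000, "Bronzo 2"),    (2500, "Bronzo 3"),    (0, "Bronzo 4"),
--     ]
--     for threshold, name in subs:
--         if rank_score >= threshold:
--             return name
--     return "Unranked"
-- ===== SOURCE B (Python) =====
-- SUB_NAMES = [
--     "Bronzo 4", "Bronzo 3", "Bronzo 2", "Bronzo 1",
--     "Argento 4", "Argento 3", "Argento 2", "Argento 1",
--     "Oro 4", "Oro 3", "Oro 2", "Oro 1",
--     "Platino 4", "Platino 3", "Platino 2", "Platino 1",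
--     "Diamante 4", "Diamante 3", "Diamante 2", "Diamante 1",
-- ]
--
-- def determine_sub_rank(rank_score: int, position: int = 99999) -> str:
--     if position <= 500:
--         return "Ruby"
--     idx = rank_score // 2500
--     if idx < 0:
--         return "Unranked"
--     return SUB_NAMES[min(idx, 19)]
-- ===== Notes on version B (the rewrite author's own statement) =====
-- stated objective: simpler
-- what changed: Replaces the 20-entry descending threshold scan with a closed-form index rank_score // 2500 (clamped to 19, negative -> Unranked) into an ascending name table.
import Mathlib
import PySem

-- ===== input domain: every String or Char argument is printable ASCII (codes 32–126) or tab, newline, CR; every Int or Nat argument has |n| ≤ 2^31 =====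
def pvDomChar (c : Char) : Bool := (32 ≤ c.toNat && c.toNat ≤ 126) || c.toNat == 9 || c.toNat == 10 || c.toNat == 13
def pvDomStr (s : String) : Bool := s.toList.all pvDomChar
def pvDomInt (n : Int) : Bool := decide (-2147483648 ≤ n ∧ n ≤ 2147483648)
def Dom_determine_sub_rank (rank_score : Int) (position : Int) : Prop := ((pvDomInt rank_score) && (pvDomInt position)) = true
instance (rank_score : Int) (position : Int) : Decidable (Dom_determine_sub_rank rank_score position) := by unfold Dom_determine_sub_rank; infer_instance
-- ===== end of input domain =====

set_option maxHeartbeats 2000000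


-- B replaces A's descending threshold scan by a closed-form index rank_score // 2500 into an ascending name table (simpler).

-- ===== PORT A =====
-- the descending (threshold, name) table of A
def pvSubsA : List (Int × String) :=
  [(47500, "Diamante 1"), (45000, "Diamante 2"), (42500, "Diamante 3"), (40000, "Diamante 4"),
   (37500, "Platino 1"),  (35000, "Platino 2"),  (32500, "Platino 3"),  (30000, "Platino 4"),
   (27500, "Oro 1"),      (25000, "Oro 2"),      (22500, "Oro 3"),      (20000, "Oro 4"),
   (17500, "Argento 1"),  (15000, "Argento 2"),  (12500, "Argento 3"),  (10000, "Argento 4"),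
   (7500, "Bronzo 1"),    (5000, "Bronzo 2"),    (2500, "Bronzo 3"),    (0, "Bronzo 4")]

-- the for-loop with early return: first entry whose threshold is ≤ rank_score
def pvScanA (subs : List (Int × String)) (rank_score : Int) : String :=
  match subs with
  | [] => "Unranked"
  | (threshold, name) :: rest =>
    if rank_score ≥ threshold then name else pvScanA rest rank_score

def determine_sub_rank (rank_score : Int) (position : Int) : String :=
  if position ≤ 500 then "Ruby"
  else pvScanA pvSubsA rank_score

-- ===== PORT B =====
-- ascending sub-rank names, index k = names for scores in [2500k, 2500(k+1))
def pvSubNames : List String :=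
  ["Bronzo 4", "Bronzo 3", "Bronzo 2", "Bronzo 1",
   "Argento 4", "Argento 3", "Argento 2", "Argento 1",
   "Oro 4", "Oro 3", "Oro 2", "Oro 1",
   "Platino 4", "Platino 3", "Platino 2", "Platino 1",
   "Diamante 4", "Diamante 3", "Diamante 2", "Diamante 1"]

def determine_sub_rank_alt (rank_score : Int) (position : Int) : String :=
  if position ≤ 500 then "Ruby"
  else
    let idx := PySem.Int.floordiv rank_score 2500
    if idx < 0 then "Unranked"
    else (PySem.List.pyGet? pvSubNames (min idx 19)).getD ""

-- ===== PRECONDITION & SPEC =====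
def Spec_determine_sub_rank (rank_score : Int) (position : Int) (out : String) : Prop := out = determine_sub_rank_alt rank_score position
instance (rank_score : Int) (position : Int) (out : String) : Decidable (Spec_determine_sub_rank rank_score position out) := by unfold Spec_determine_sub_rank; infer_instance

-- ===== CLAIM (what is proved, stated in full; the proofs are below) =====
def Claim_equal_determine_sub_rank : Prop := ∀ (rank_score : Int) (position : Int), Dom_determine_sub_rank rank_score position → Spec_determine_sub_rank rank_score position (determine_sub_rank rank_score position)

-- ===== LEMMAS AND PROOFS =====

theorem pvScan_eq_alt (s : Int) :
    pvScanA pvSubsA s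
    = (if PySem.Int.floordiv s 2500 < 0 then "Unranked"
       else (PySem.List.pyGet? pvSubNames (min (PySem.Int.floordiv s 2500) 19)).getD "") := by
  obtain ⟨q, r, hs, hr0, hr1⟩ : ∃ q r, s = 2500*q + r ∧ 0 ≤ r ∧ r < 2500 :=
    ⟨s / 2500, s % 2500, by omega, by omega, by omega⟩
  have hfd : PySem.Int.floordiv s 2500 = q := by
    rw [PySem.Int.floordiv_eq_ediv_of_pos (by norm_num)]; omega
  rw [hfd]
  simp only [pvScanA, pvSubsA]
  rcases (by omega :
      q < 0 ∨ q = 0 ∨ q = 1 ∨ q = 2 ∨ q = 3 ∨ q = 4 ∨ q = 5 ∨ q = 6 ∨ q = 7 ∨ q = 8 ∨ q = 9 ∨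
      q = 10 ∨ q = 11 ∨ q = 12 ∨ q = 13 ∨ q = 14 ∨ q = 15 ∨ q = 16 ∨ q = 17 ∨ q = 18 ∨ 19 ≤ q) with
    h | h | h | h | h | h | h | h | h | h | h | h | h | h | h | h | h | h | h | h | h <;>
    try subst h
  all_goals repeat first | rw [if_neg (by omega)] | rw [if_pos (by omega)]
  all_goals first
    | rfl
    | decide
    | (rw [min_eq_right (by omega : (19:Int) ≤ q)]; decide)

-- ===== VERDICT (by name: the statement is the Claim_ definition above) =====
theorem determine_sub_rank_spec : Claim_equal_determine_sub_rank := by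
  intro s p _
  unfold Spec_determine_sub_rank determine_sub_rank determine_sub_rank_alt
  by_cases hp : p ≤ 500
  · simp [hp]
  · simp only [hp, if_false]
    exact pvScan_eq_alt s
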